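-- pv_equiv track=rewrite | github.com/Fellepp/ITGK | Øving 7/SammenhengendeTallrekke.py | longestEven
-- ===== SOURCE A (Python) =====
-- def longestEven(lst):
--     rangeCheck = 0
--     index = 0
--     for i in range(0, len(lst)):
--         evens = 0
--         if lst[i] % 2 == 0 and lst[i] != 0:
--             evens += 1
--             for j in range(i+1, len(lst)):
--                 if lst[j] % 2 == 0:
--                     evens += 1
--                 else:
--                     break
--             if evens > rangeCheck:
--                 rangeCheck = evens
--                 index = i
--     return index, rangeCheck
-- ===== SOURCE B (Python) =====
-- def longestEven(lst):
--     best_len = 0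
--     best_idx = 0
--     first_nz = None      # index of earliest nonzero even in the current even run
--     run = 0              # length of the run counted from first_nz
--     for pos, x in enumerate(lst):
--         if x % 2 == 0:
--             if first_nz is None and x != 0:
--                 first_nz = pos
--             if first_nz is not None:
--                 run += 1
--         else:
--             first_nz = None
--             run = 0
--         if first_nz is not None and run > best_len:
--             best_len = run
--             best_idx = first_nz
--     return best_idx, best_len
-- ===== Notes on version B (the rewrite author's own statement) =====
-- stated objective: alternative
-- what changed: Replaced the quadratic rescan (for each nonzero even element, an inner loop re-counting the whole even run ahead of it) with a single left-to-right pass that tracks the earliest nonzero-even start of the current even run and its running length, updating the best (start, length) incrementally.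
import Mathlib
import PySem

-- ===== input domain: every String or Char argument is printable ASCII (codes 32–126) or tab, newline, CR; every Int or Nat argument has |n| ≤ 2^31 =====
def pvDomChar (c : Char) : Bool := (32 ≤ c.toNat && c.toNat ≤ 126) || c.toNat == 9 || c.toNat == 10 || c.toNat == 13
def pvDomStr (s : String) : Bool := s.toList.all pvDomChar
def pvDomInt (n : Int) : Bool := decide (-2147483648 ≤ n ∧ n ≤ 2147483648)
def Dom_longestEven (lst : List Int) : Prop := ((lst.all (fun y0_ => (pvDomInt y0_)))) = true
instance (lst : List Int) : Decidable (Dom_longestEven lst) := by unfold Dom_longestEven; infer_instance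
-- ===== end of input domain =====

-- B is an alternative single pass tracking the current even run, instead of A's rescan per nonzero even element.

-- ===== PORT A =====
-- inner 'for j in range(i+1,...): count evens until break', over the suffix after position i
def pvCntA (l : List Int) : Int :=
  match l with
  | [] => 0
  | x :: xs => if PySem.Int.mod x 2 = 0 then 1 + pvCntA xs else 0

-- outer loop: state (rangeCheck, index), i the current position, suffix = lst[i:]
def pvLoopA : List Int → Int → Int × Int → Int × Int
  | [], _, st => st
  | x :: xs, i, (rc, idx) =>
      pvLoopA xs (i + 1)
        (if PySem.Int.mod x 2 = 0 ∧ x ≠ 0 then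
          (let evens := 1 + pvCntA xs
           if evens > rc then (evens, i) else (rc, idx))
         else (rc, idx))

def longestEven (lst : List Int) : List Int :=
  let r := pvLoopA lst 0 (0, 0)
  [r.2, r.1]

-- ===== PORT B =====
-- single pass; state (best_len, best_idx, first_nz, run), pos the current position
def pvLoopB : List Int → Int → Int × Int × Option Int × Int → Int × Int × Option Int × Int
  | [], _, st => st
  | x :: xs, pos, (bl, bi, fnz, run) =>
      let fr : Option Int × Int :=
        if PySem.Int.mod x 2 = 0 then
          let f := if fnz = none ∧ x ≠ 0 then some pos else fnz
          (f, if f.isSome then run + 1 else run)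
        else (none, 0)
      let bb : Int × Int :=
        match fr.1 with
        | some p => if fr.2 > bl then (fr.2, p) else (bl, bi)
        | none => (bl, bi)
      pvLoopB xs (pos + 1) (bb.1, bb.2, fr.1, fr.2)

def longestEven_alt (lst : List Int) : List Int :=
  let r := pvLoopB lst 0 (0, 0, none, 0)
  [r.2.1, r.1]

-- ===== PRECONDITION & SPEC =====
def Spec_longestEven (lst : List Int) (out : List Int) : Prop := out = longestEven_alt lst
instance (lst : List Int) (out : List Int) : Decidable (Spec_longestEven lst out) := by unfold Spec_longestEven; infer_instance

-- ===== CLAIM (what is proved, stated in full; the proofs are below) =====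
def Claim_equal_longestEven : Prop := ∀ (lst : List Int), Dom_longestEven lst → Spec_longestEven lst (longestEven lst)

-- ===== LEMMAS AND PROOFS =====

-- relation between A's state and B's state while traversing the same suffix
def pvRel (xs : List Int) (rc idx bl bi : Int) (fnz : Option Int) (run : Int) : Prop :=
  match fnz with
  | none => run = 0 ∧ rc = bl ∧ idx = bi
  | some p => 1 ≤ run ∧ run ≤ bl ∧
      ((run + pvCntA xs > bl ∧ rc = run + pvCntA xs ∧ idx = p) ∨
       (run + pvCntA xs ≤ bl ∧ rc = bl ∧ idx = bi))

lemma pvCntA_nonneg (l : List Int) : 0 ≤ pvCntA l := by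
  induction l with
  | nil => simp [pvCntA]
  | cons x xs ih => simp only [pvCntA]; split <;> omega

lemma pvLoop_agree (xs : List Int) : ∀ (i rc idx bl bi : Int) (fnz : Option Int) (run : Int),
    pvRel xs rc idx bl bi fnz run →
    pvLoopA xs i (rc, idx) =
      ((pvLoopB xs i (bl, bi, fnz, run)).1, (pvLoopB xs i (bl, bi, fnz, run)).2.1) := by
  induction xs with
  | nil =>
    intro i rc idx bl bi fnz run h
    cases fnz with
    | none =>
      simp only [pvRel] at h
      simp [pvLoopA, pvLoopB, h.2.1, h.2.2]
    | some p =>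
      simp only [pvRel, pvCntA] at h
      have h1 : rc = bl := by omega
      have h2 : idx = bi := by omega
      simp [pvLoopA, pvLoopB, h1, h2]
  | cons x rest ih =>
    intro i rc idx bl bi fnz run h
    have hc := pvCntA_nonneg rest
    by_cases he : (2:Int) ∣ x
    · have hcnt : pvCntA (x :: rest) = 1 + pvCntA rest := by simp [pvCntA, he]
      by_cases hz : x = 0
      · -- even zero: A skips, B extends the run if one is open
        have e1 : pvLoopA (x :: rest) i (rc, idx) = pvLoopA rest (i + 1) (rc, idx) := by
          simp [pvLoopA, hz]
        cases fnz with
        | none =>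
          simp only [pvRel] at h
          have e2 : pvLoopB (x :: rest) i (bl, bi, none, run)
              = pvLoopB rest (i + 1) (bl, bi, none, run) := by
            simp [pvLoopB, PySem.Int.mod_eq_zero_iff_dvd, he, hz]
          rw [e1, e2]
          exact ih (i + 1) rc idx bl bi none run (by simp only [pvRel, and_true, true_and]; omega)
        | some p =>
          simp only [pvRel] at h
          rw [hcnt] at h
          by_cases hb : run + 1 > bl
          · have e2 : pvLoopB (x :: rest) i (bl, bi, some p, run)
                = pvLoopB rest (i + 1) (run + 1, p, some p, run + 1) := by
              simp [pvLoopB, PySem.Int.mod_eq_zero_iff_dvd, he, hz, hb]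
            rw [e1, e2]
            exact ih (i + 1) rc idx (run + 1) p (some p) (run + 1)
              (by simp only [pvRel, and_true, true_and]; omega)
          · have e2 : pvLoopB (x :: rest) i (bl, bi, some p, run)
                = pvLoopB rest (i + 1) (bl, bi, some p, run + 1) := by
              simp [pvLoopB, PySem.Int.mod_eq_zero_iff_dvd, he, hz, hb]
            rw [e1, e2]
            exact ih (i + 1) rc idx bl bi (some p) (run + 1)
              (by simp only [pvRel, and_true, true_and]; omega)
      · -- even nonzero: A rescans ahead, B opens or extends the run
        by_cases ha : 1 + pvCntA rest > rc
        · have e1 : pvLoopA (x :: rest) i (rc, idx)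
              = pvLoopA rest (i + 1) (1 + pvCntA rest, i) := by
            simp [pvLoopA, PySem.Int.mod_eq_zero_iff_dvd, he, hz, ha]
          cases fnz with
          | none =>
            simp only [pvRel] at h
            by_cases hb : (1 : Int) > bl
            · have e2 : pvLoopB (x :: rest) i (bl, bi, none, run)
                  = pvLoopB rest (i + 1) (run + 1, i, some i, run + 1) := by
                simp [pvLoopB, PySem.Int.mod_eq_zero_iff_dvd, he, hz, h.1, hb]
              rw [e1, e2]
              exact ih (i + 1) (1 + pvCntA rest) i (run + 1) i (some i) (run + 1)
                (by simp only [pvRel, and_true, true_and]; omega)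
            · have e2 : pvLoopB (x :: rest) i (bl, bi, none, run)
                  = pvLoopB rest (i + 1) (bl, bi, some i, run + 1) := by
                simp [pvLoopB, PySem.Int.mod_eq_zero_iff_dvd, he, hz, h.1, hb]
              rw [e1, e2]
              exact ih (i + 1) (1 + pvCntA rest) i bl bi (some i) (run + 1)
                (by simp only [pvRel, and_true, true_and]; omega)
          | some p =>
            simp only [pvRel] at h
            rw [hcnt] at h
            by_cases hb : run + 1 > bl
            · have e2 : pvLoopB (x :: rest) i (bl, bi, some p, run)
                  = pvLoopB rest (i + 1) (run + 1, p, some p, run + 1) := by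
                simp [pvLoopB, PySem.Int.mod_eq_zero_iff_dvd, he, hz, hb]
              rw [e1, e2]
              exact ih (i + 1) (1 + pvCntA rest) i (run + 1) p (some p) (run + 1)
                (by simp only [pvRel, and_true, true_and]; omega)
            · have e2 : pvLoopB (x :: rest) i (bl, bi, some p, run)
                  = pvLoopB rest (i + 1) (bl, bi, some p, run + 1) := by
                simp [pvLoopB, PySem.Int.mod_eq_zero_iff_dvd, he, hz, hb]
              rw [e1, e2]
              exact ih (i + 1) (1 + pvCntA rest) i bl bi (some p) (run + 1)
                (by simp only [pvRel, and_true, true_and]; omega)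
        · have e1 : pvLoopA (x :: rest) i (rc, idx) = pvLoopA rest (i + 1) (rc, idx) := by
            simp [pvLoopA, PySem.Int.mod_eq_zero_iff_dvd, he, hz, ha]
          cases fnz with
          | none =>
            simp only [pvRel] at h
            by_cases hb : (1 : Int) > bl
            · have e2 : pvLoopB (x :: rest) i (bl, bi, none, run)
                  = pvLoopB rest (i + 1) (run + 1, i, some i, run + 1) := by
                simp [pvLoopB, PySem.Int.mod_eq_zero_iff_dvd, he, hz, h.1, hb]
              rw [e1, e2]
              exact ih (i + 1) rc idx (run + 1) i (some i) (run + 1)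
                (by simp only [pvRel, and_true, true_and]; omega)
            · have e2 : pvLoopB (x :: rest) i (bl, bi, none, run)
                  = pvLoopB rest (i + 1) (bl, bi, some i, run + 1) := by
                simp [pvLoopB, PySem.Int.mod_eq_zero_iff_dvd, he, hz, h.1, hb]
              rw [e1, e2]
              exact ih (i + 1) rc idx bl bi (some i) (run + 1)
                (by simp only [pvRel, and_true, true_and]; omega)
          | some p =>
            simp only [pvRel] at h
            rw [hcnt] at h
            by_cases hb : run + 1 > bl
            · have e2 : pvLoopB (x :: rest) i (bl, bi, some p, run)
                  = pvLoopB rest (i + 1) (run + 1, p, some p, run + 1) := by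
                simp [pvLoopB, PySem.Int.mod_eq_zero_iff_dvd, he, hz, hb]
              rw [e1, e2]
              exact ih (i + 1) rc idx (run + 1) p (some p) (run + 1)
                (by simp only [pvRel, and_true, true_and]; omega)
            · have e2 : pvLoopB (x :: rest) i (bl, bi, some p, run)
                  = pvLoopB rest (i + 1) (bl, bi, some p, run + 1) := by
                simp [pvLoopB, PySem.Int.mod_eq_zero_iff_dvd, he, hz, hb]
              rw [e1, e2]
              exact ih (i + 1) rc idx bl bi (some p) (run + 1)
                (by simp only [pvRel, and_true, true_and]; omega)
    · -- odd: A skips, B resets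
      have hcnt : pvCntA (x :: rest) = 0 := by simp [pvCntA, he]
      have e1 : pvLoopA (x :: rest) i (rc, idx) = pvLoopA rest (i + 1) (rc, idx) := by
        simp [pvLoopA, PySem.Int.mod_eq_zero_iff_dvd, he]
      have e2 : pvLoopB (x :: rest) i (bl, bi, fnz, run)
          = pvLoopB rest (i + 1) (bl, bi, none, 0) := by
        simp [pvLoopB, PySem.Int.mod_eq_zero_iff_dvd, he]
      rw [e1, e2]
      cases fnz with
      | none =>
        simp only [pvRel] at h
        exact ih (i + 1) rc idx bl bi none 0 (by simp only [pvRel, and_true, true_and]; omega)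
      | some p =>
        simp only [pvRel] at h
        rw [hcnt] at h
        exact ih (i + 1) rc idx bl bi none 0 (by simp only [pvRel, and_true, true_and]; omega)

-- ===== VERDICT (by name: the statement is the Claim_ definition above) =====
theorem longestEven_spec : Claim_equal_longestEven := by
  intro lst _
  unfold Spec_longestEven longestEven longestEven_alt
  have h := pvLoop_agree lst 0 0 0 0 0 none 0 (by simp [pvRel])
  simp only [h]
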